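-- pv_equiv track=rewrite | github.com/zeppeki/project-euler-first100 | problems/lib/combinatorics.py | permutation_formula
-- ===== SOURCE A (Python) =====
-- def permutation_formula(n: int, r: int) -> int:
--     """
--     順列の数を計算
--
--     Args:
--         n: 全体の要素数
--         r: 選択する要素数
--
--     Returns:
--         P(n,r) = n! / (n-r)!
--
--     時間計算量: O(r)
--     空間計算量: O(1)
--     """
--     if r < 0 or r > n or n < 0:
--         return 0
--     if r == 0:
--         return 1
--
--     result = 1
--     for i in range(n, n - r, -1):
--         result *= i
--
--     return result
-- ===== SOURCE B (Python) =====
-- def permutation_formula(n: int, r: int) -> int: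
--     """P(n, r) via a balanced divide-and-conquer product of n-r+1..n."""
--     if r < 0 or r > n or n < 0:
--         return 0
--
--     def prod_range(lo: int, hi: int) -> int:
--         # product of the integers lo, lo+1, ..., hi (1 when lo > hi)
--         if lo > hi:
--             return 1
--         if lo == hi:
--             return lo
--         mid = (lo + hi) // 2
--         return prod_range(lo, mid) * prod_range(mid + 1, hi)
--
--     return prod_range(n - r + 1, n)
-- ===== Notes on version B (the rewrite author's own statement) =====
-- stated objective: alternative
-- what changed: Replaces the linear falling-factorial loop by a balanced divide-and-conquer product of the range n-r+1..n (recursive halving instead of an r-step accumulator loop).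
import Mathlib
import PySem

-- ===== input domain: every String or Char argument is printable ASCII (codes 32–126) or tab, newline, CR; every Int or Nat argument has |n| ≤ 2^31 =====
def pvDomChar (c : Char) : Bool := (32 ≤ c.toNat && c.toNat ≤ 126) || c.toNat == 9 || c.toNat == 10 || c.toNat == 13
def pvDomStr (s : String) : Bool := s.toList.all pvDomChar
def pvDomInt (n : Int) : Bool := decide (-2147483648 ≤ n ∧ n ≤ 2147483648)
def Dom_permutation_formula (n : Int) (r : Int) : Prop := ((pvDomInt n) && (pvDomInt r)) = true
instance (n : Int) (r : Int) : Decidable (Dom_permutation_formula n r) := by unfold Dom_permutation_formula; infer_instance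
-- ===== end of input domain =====

-- B replaces A's linear falling-factorial loop by a balanced divide-and-conquer product of n-r+1..n (alternative structure, similar cost).


-- ===== PORT A =====
def permutation_formula (n : Int) (r : Int) : Int :=
  if r < 0 ∨ n < r ∨ n < 0 then 0
  else if r = 0 then 1
  else (PySem.List.pyRange n (n - r) (-1)).foldl (fun result i => result * i) 1

-- ===== PORT B =====
-- product of the integers lo, lo+1, ..., hi (1 when lo > hi), by recursive halving
def pvProdRange (lo hi : Int) : Int :=
  if hi < lo then 1
  else if lo = hi then lo
  else
    let mid := PySem.Int.floordiv (lo + hi) 2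
    pvProdRange lo mid * pvProdRange (mid + 1) hi
termination_by (hi - lo).toNat
decreasing_by
  · have h := PySem.Int.floordiv_eq_ediv_of_pos (a := lo + hi) (b := 2) (by omega)
    simp only [h] at *
    omega
  · have h := PySem.Int.floordiv_eq_ediv_of_pos (a := lo + hi) (b := 2) (by omega)
    simp only [h] at *
    omega

def permutation_formula_alt (n : Int) (r : Int) : Int :=
  if r < 0 ∨ n < r ∨ n < 0 then 0
  else pvProdRange (n - r + 1) n

-- ===== PRECONDITION & SPEC =====
def Spec_permutation_formula (n : Int) (r : Int) (out : Int) : Prop := out = permutation_formula_alt n r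
instance (n : Int) (r : Int) (out : Int) : Decidable (Spec_permutation_formula n r out) := by unfold Spec_permutation_formula; infer_instance

-- ===== CLAIM (what is proved, stated in full; the proofs are below) =====
def Claim_equal_permutation_formula : Prop := ∀ (n : Int) (r : Int), Dom_permutation_formula n r → Spec_permutation_formula n r (permutation_formula n r)

-- ===== LEMMAS AND PROOFS =====

-- canonical falling product: pvF k m = m * (m-1) * ... * (m-k+1)
def pvF : Nat → Int → Int
  | 0, _ => 1
  | k+1, m => m * pvF k (m - 1)

theorem pvF_add (a b : Nat) (m : Int) : pvF (a + b) m = pvF a m * pvF b (m - a) := by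
  induction a generalizing m with
  | zero => simp [pvF]
  | succ k ih =>
    have : k + 1 + b = (k + b) + 1 := by omega
    rw [this]
    simp only [pvF, ih (m - 1)]
    have : m - 1 - (k : Int) = m - ((k : Nat) + 1 : Nat) := by push_cast; ring
    rw [this, mul_assoc]

theorem pvProdRange_eq (lo hi : Int) : pvProdRange lo hi = pvF (hi + 1 - lo).toNat hi := by
  induction lo, hi using pvProdRange.induct with
  | case1 lo hi h =>
    rw [pvProdRange]
    simp only [if_pos h]
    have : (hi + 1 - lo).toNat = 0 := by omega
    rw [this]; rfl
  | case2 lo h =>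
    rw [pvProdRange]
    simp only [lt_irrefl, if_false, reduceIte]
    have : (lo + 1 - lo).toNat = 1 := by omega
    rw [this]
    simp [pvF]
  | case3 lo hi h1 h2 mid ih1 ih2 =>
    have hmid : mid = PySem.Int.floordiv (lo + hi) 2 := rfl
    have hdiv : mid = (lo + hi) / 2 := by
      rw [hmid]; exact PySem.Int.floordiv_eq_ediv_of_pos (by omega)
    have hlo : lo ≤ mid := by omega
    have hhi : mid < hi := by omega
    rw [pvProdRange]
    simp only [if_neg h1, if_neg h2]
    rw [← hmid, ih1, ih2]
    have hkk : (hi + 1 - (mid + 1)).toNat = (hi - mid).toNat := by omega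
    rw [hkk]
    have ha : ((hi - mid).toNat : Int) = hi - mid := by omega
    have hsum : (hi + 1 - lo).toNat = (hi - mid).toNat + (mid + 1 - lo).toNat := by omega
    rw [hsum, pvF_add, ha]
    have : hi - (hi - mid) = mid := by ring
    rw [this, mul_comm]

theorem pvFold_eq (k : Nat) : ∀ (a b init : Int), (a - b).toNat = k →
    (PySem.List.pyRange a b (-1)).foldl (fun result i => result * i) init = init * pvF k a := by
  induction k with
  | zero =>
    intro a b init h
    have hab : a ≤ b := by omega
    rw [PySem.List.pyRange_neg_one_eq_nil hab]
    simp [pvF]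
  | succ k ih =>
    intro a b init h
    have hba : b < a := by omega
    rw [PySem.List.pyRange_neg_one_cons hba]
    simp only [List.foldl_cons]
    rw [ih (a - 1) b (init * a) (by omega)]
    simp [pvF, mul_assoc]

-- ===== VERDICT (by name: the statement is the Claim_ definition above) =====
theorem permutation_formula_spec : Claim_equal_permutation_formula := by
  intro n r _
  unfold Spec_permutation_formula permutation_formula permutation_formula_alt
  by_cases hg : r < 0 ∨ n < r ∨ n < 0
  · simp [hg]
  · simp only [if_neg hg]
    rw [not_or, not_or] at hg
    simp only [not_lt] at hg
    obtain ⟨hr0, hrn, hn0⟩ := hg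
    rw [pvProdRange_eq]
    have hk : (n + 1 - (n - r + 1)).toNat = r.toNat := by omega
    rw [hk]
    by_cases hr : r = 0
    · subst hr; simp [pvF]
    · rw [if_neg hr, pvFold_eq r.toNat n (n - r) 1 (by omega), one_mul]
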